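-- pv_equiv track=rewrite | github.com/hyerimmy/Cote | Programmers/Lv.0/[미완료] 삼각형의 완성조건 (2).py | solution
-- ===== SOURCE A (Python) =====
-- def solution(sides):
--     answer = list()
--     sides.sort()
--     for a in range(sides[1] - sides[0] + 1, sides[1]):
--         if a not in answer:
--             answer.append(a)
--     for b in range(sides[0] + 1, sides[0] + sides[1]):
--         if b not in answer:
--             answer.append(b)
--     return len(answer)
-- ===== SOURCE B (Python) =====
-- def solution(sides):
--     s = sorted(sides)
--     s0, s1 = s[0], s[1]
--     def rsize(a, b):
--         return max(0, b - a)
--     return (rsize(s1 - s0 + 1, s1)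
--             + rsize(s0 + 1, s0 + s1)
--             - rsize(max(s1 - s0 + 1, s0 + 1), min(s1, s0 + s1)))
-- ===== Notes on version B (the rewrite author's own statement) =====
-- stated objective: simpler
-- what changed: Replaces the two dedup-append loops over integer ranges by the closed-form inclusion-exclusion count |R1|+|R2|-|R1-int-R2| of the two contiguous ranges, computed arithmetically from the two smallest sides; B also leaves the input list unmutated (A sorts it in place).
import Mathlib
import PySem

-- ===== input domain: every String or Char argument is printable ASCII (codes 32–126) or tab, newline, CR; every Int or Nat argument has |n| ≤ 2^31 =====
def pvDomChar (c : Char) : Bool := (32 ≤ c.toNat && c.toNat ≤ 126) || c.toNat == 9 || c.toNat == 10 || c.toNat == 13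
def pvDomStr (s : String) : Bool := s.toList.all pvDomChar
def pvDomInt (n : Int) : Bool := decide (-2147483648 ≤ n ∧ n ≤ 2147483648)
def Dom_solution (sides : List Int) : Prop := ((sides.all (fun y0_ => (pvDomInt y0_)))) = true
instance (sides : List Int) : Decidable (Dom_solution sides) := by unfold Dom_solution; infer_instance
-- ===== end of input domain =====

-- B replaces A's dedup-append loops over two integer ranges by the closed-form
-- inclusion-exclusion count |R1|+|R2|-|R1∩R2|; note A sorts `sides` in place
-- (a side effect B avoids by using sorted()); the claim is about return values.


-- ===== PORT A =====
-- the dedup-append body of both of A's loops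
def pvDedupStep (acc : List Int) (x : Int) : List Int :=
  if x ∈ acc then acc else acc ++ [x]

def solution (sides : List Int) : Int :=
  let s := PySem.List.sorted sides (fun x => x) false   -- sides.sort()
  let s0 := (PySem.List.pyGet? s 0).getD 0              -- sides[0] (Pre_ex: len ≥ 2)
  let s1 := (PySem.List.pyGet? s 1).getD 0              -- sides[1]
  let answer : List Int := []
  let answer := (PySem.List.pyRange (s1 - s0 + 1) s1 1).foldl pvDedupStep answer
  let answer := (PySem.List.pyRange (s0 + 1) (s0 + s1) 1).foldl pvDedupStep answer
  (answer.length : Int)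

-- ===== PORT B =====
def pvRsize (a b : Int) : Int := max 0 (b - a)

def solution_alt (sides : List Int) : Int :=
  let s := PySem.List.sorted sides (fun x => x) false
  let s0 := (PySem.List.pyGet? s 0).getD 0
  let s1 := (PySem.List.pyGet? s 1).getD 0
  pvRsize (s1 - s0 + 1) s1 + pvRsize (s0 + 1) (s0 + s1)
    - pvRsize (max (s1 - s0 + 1) (s0 + 1)) (min s1 (s0 + s1))

-- ===== PRECONDITION & SPEC =====
-- Pre_ excludes only lists with fewer than two elements, on which A (and B) raise IndexError.
def Pre_solution (sides : List Int) : Prop := 2 ≤ sides.length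
instance (sides : List Int) : Decidable (Pre_solution sides) := by unfold Pre_solution; infer_instance
def pvWitness_solution : List Int := ([3, 4] : List Int)

def Spec_solution (sides : List Int) (out : Int) : Prop := out = solution_alt sides
instance (sides : List Int) (out : Int) : Decidable (Spec_solution sides out) := by unfold Spec_solution; infer_instance

-- ===== CLAIM (what is proved, stated in full; the proofs are below) =====
def Claim_equal_solution : Prop := ∀ (sides : List Int), Dom_solution sides → Pre_solution sides → Spec_solution sides (solution sides)

-- ===== LEMMAS AND PROOFS =====

-- folding the dedup-append step over a duplicate-free list appends exactly
-- the elements not already present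
theorem dedup_foldl (l : List Int) (acc : List Int) (h : l.Nodup) :
    l.foldl pvDedupStep acc = acc ++ l.filter (fun x => decide (x ∉ acc)) := by
  induction l generalizing acc with
  | nil => simp
  | cons x t ih =>
    rcases List.nodup_cons.mp h with ⟨hx, ht⟩
    by_cases hmem : x ∈ acc
    · simp [pvDedupStep, hmem, ih _ ht]
    · simp [pvDedupStep, hmem, ih _ ht]
      apply List.filter_congr
      intro y hy
      have hne : y ≠ x := fun e => hx (e ▸ hy)
      simp [hne]

-- counting the members of [c,d) inside the range [a,b)
theorem filter_pyRange_interval (a b c d : Int) :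
    (((PySem.List.pyRange a b 1).filter (fun x => decide (c ≤ x ∧ x < d))).length : Int)
      = max 0 (min b d - max a c) := by
  by_cases hab : b ≤ a
  · rw [PySem.List.pyRange_one_eq_nil hab]
    simp; omega
  · rw [not_le] at hab
    have hlt : (b - (a + 1)).toNat < (b - a).toNat := by omega
    rw [PySem.List.pyRange_one_cons hab, List.filter_cons]
    have IH := filter_pyRange_interval (a + 1) b c d
    by_cases hc : c ≤ a ∧ a < d
    · rw [if_pos (by simpa using hc)]
      simp only [List.length_cons]
      push_cast
      omega
    · rw [if_neg (by simpa using hc)]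
      omega
termination_by (b - a).toNat
decreasing_by omega

-- the two filtered-range lengths occurring in A's result
theorem filter_notin_length (a b c d : Int) :
    (((PySem.List.pyRange a b 1).filter
        (fun x => decide (x ∉ PySem.List.pyRange c d 1))).length : Int)
      = max 0 (b - a) - max 0 (min b d - max a c) := by
  have hcongr : (PySem.List.pyRange a b 1).filter
        (fun x => decide (x ∉ PySem.List.pyRange c d 1))
      = (PySem.List.pyRange a b 1).filter (fun x => !decide (c ≤ x ∧ x < d)) := by
    apply List.filter_congr
    intro y _
    rw [← decide_not]
    exact decide_eq_decide.mpr (by rw [PySem.List.mem_pyRange_one])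
  have hsplit := List.length_eq_length_filter_add
      (l := PySem.List.pyRange a b 1) (fun x => decide (c ≤ x ∧ x < d))
  have hin := filter_pyRange_interval a b c d
  have hlen : (PySem.List.pyRange a b 1).length = (b - a).toNat :=
    PySem.List.length_pyRange_one a b
  rw [hcongr]
  omega

-- core identity: A's union count equals B's inclusion-exclusion formula
theorem core (s0 s1 : Int) :
    ((((PySem.List.pyRange (s0 + 1) (s0 + s1) 1).foldl pvDedupStep
        ((PySem.List.pyRange (s1 - s0 + 1) s1 1).foldl pvDedupStep [])).length : Int))
      = pvRsize (s1 - s0 + 1) s1 + pvRsize (s0 + 1) (s0 + s1)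
          - pvRsize (max (s1 - s0 + 1) (s0 + 1)) (min s1 (s0 + s1)) := by
  have h1 : (PySem.List.pyRange (s1 - s0 + 1) s1 1).foldl pvDedupStep []
      = PySem.List.pyRange (s1 - s0 + 1) s1 1 := by
    rw [dedup_foldl _ _ (PySem.List.nodup_pyRange_one _ _)]
    simp
  rw [h1, dedup_foldl _ _ (PySem.List.nodup_pyRange_one _ _)]
  have h2 := filter_notin_length (s0 + 1) (s0 + s1) (s1 - s0 + 1) s1
  have hlen : (PySem.List.pyRange (s1 - s0 + 1) s1 1).length = (s1 - (s1 - s0 + 1)).toNat :=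
    PySem.List.length_pyRange_one _ _
  simp only [List.length_append]
  simp only [pvRsize]
  omega

-- ===== VERDICT (by name: the statement is the Claim_ definition above) =====
theorem solution_spec : Claim_equal_solution := by
  intro sides _ _
  unfold Spec_solution solution solution_alt
  exact core _ _
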